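-- pv_equiv track=rewrite | github.com/borgdev/anant | anant/kg/reasoning.py | _interpret_path_semantics
-- ===== SOURCE A (Python) =====
-- from typing import Dict, List, Any, Optional, Set, Tuple, Callable, Union
--
-- def _interpret_path_semantics(path: List[str], relationships: List[str]) -> Optional[str]:
--     """Interpret the semantic meaning of a path"""
--
--     if not relationships:
--         return None
--
--     # Simple semantic interpretation patterns
--     if len(relationships) == 1:
--         return f"Direct {relationships[0]} relationship"
--
--     # Check for common patterns
--     rel_string = " -> ".join(relationships)
--
--     # Inheritance chain
--     if all('subclass' in rel.lower() or 'inherit' in rel.lower() for rel in relationships):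
--         return f"Inheritance hierarchy ({len(relationships)} levels)"
--
--     # Part-whole relationship
--     if any('part' in rel.lower() or 'contain' in rel.lower() for rel in relationships):
--         return "Part-whole relationship chain"
--
--     # Association chain
--     if any('associat' in rel.lower() or 'relat' in rel.lower() for rel in relationships):
--         return "Association relationship chain"
--
--     return f"Complex relationship: {rel_string}"
-- ===== SOURCE B (Python) =====
-- _PATTERNS = (("inh", ("subclass", "inherit")),
--              ("pw", ("part", "contain")),
--              ("assoc", ("associat", "relat")))
--
--
-- def _tags(rel):
--     """Category tags matched by one relationship name."""
--     low = rel.lower()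
--     return [tag for tag, subs in _PATTERNS if any(s in low for s in subs)]
--
--
-- def _interpret_path_semantics(path, relationships):
--     """Interpret the semantic meaning of a path (table-driven tag list)."""
--     if not relationships:
--         return None
--     if len(relationships) == 1:
--         return f"Direct {relationships[0]} relationship"
--     tags = [t for rel in relationships for t in _tags(rel)]
--     if tags.count("inh") == len(relationships):
--         return f"Inheritance hierarchy ({len(relationships)} levels)"
--     if "pw" in tags:
--         return "Part-whole relationship chain"
--     if "assoc" in tags:
--         return "Association relationship chain"
--     return f"Complex relationship: {' -> '.join(relationships)}"
-- ===== Notes on version B (the rewrite author's own statement) =====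
-- stated objective: alternative
-- what changed: Instead of three separate all/any boolean scans with hard-coded substring tests, B is table-driven: a pattern table maps each relationship to a list of category tags, all tags are flattened into one list, and the category is decided by counting 'inh' tags against the path length and by tag membership.
import Mathlib
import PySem

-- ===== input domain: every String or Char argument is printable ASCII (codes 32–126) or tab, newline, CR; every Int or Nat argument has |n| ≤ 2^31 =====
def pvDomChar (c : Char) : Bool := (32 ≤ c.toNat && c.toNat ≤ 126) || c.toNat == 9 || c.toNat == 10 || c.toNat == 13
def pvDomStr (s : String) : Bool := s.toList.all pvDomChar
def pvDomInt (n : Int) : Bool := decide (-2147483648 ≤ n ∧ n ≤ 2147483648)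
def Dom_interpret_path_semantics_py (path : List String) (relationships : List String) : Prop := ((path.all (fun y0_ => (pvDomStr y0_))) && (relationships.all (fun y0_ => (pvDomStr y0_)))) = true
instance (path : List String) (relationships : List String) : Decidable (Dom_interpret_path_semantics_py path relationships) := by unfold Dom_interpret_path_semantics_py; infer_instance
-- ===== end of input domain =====

-- B is a table-driven re-decomposition: a pattern table tags each relationship, the tags are
-- flattened into one list, and the category is read off that tag list (alternative, same cost class).

-- ===== PORT A =====
-- 'subclass' in rel.lower() or 'inherit' in rel.lower()
def pvInhA (rel : String) : Bool :=
  PySem.Str.isIn "subclass" (PySem.Str.lower rel) || PySem.Str.isIn "inherit" (PySem.Str.lower rel)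
-- 'part' in rel.lower() or 'contain' in rel.lower()
def pvPWA (rel : String) : Bool :=
  PySem.Str.isIn "part" (PySem.Str.lower rel) || PySem.Str.isIn "contain" (PySem.Str.lower rel)
-- 'associat' in rel.lower() or 'relat' in rel.lower()
def pvAssocA (rel : String) : Bool :=
  PySem.Str.isIn "associat" (PySem.Str.lower rel) || PySem.Str.isIn "relat" (PySem.Str.lower rel)

def interpret_path_semantics_py (path : List String) (relationships : List String) : Option String :=
  if relationships.isEmpty then none
  else if PySem.List.len relationships = 1 then
    some ("Direct " ++ PySem.List.pyGetD relationships 0 "" ++ " relationship")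
  else
    let rel_string := PySem.Str.join " -> " relationships
    if relationships.all pvInhA then
      some ("Inheritance hierarchy (" ++ PySem.Int.toStr (PySem.List.len relationships) ++ " levels)")
    else if relationships.any pvPWA then
      some "Part-whole relationship chain"
    else if relationships.any pvAssocA then
      some "Association relationship chain"
    else
      some ("Complex relationship: " ++ rel_string)

-- ===== PORT B =====
-- _PATTERNS: category tag -> substring patterns
def pvPatterns : List (String × List String) :=
  [("inh", ["subclass", "inherit"]), ("pw", ["part", "contain"]), ("assoc", ["associat", "relat"])]

-- _tags(rel): tags whose substring list matches the lowered relationship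
def pvTags (rel : String) : List String :=
  let low := PySem.Str.lower rel
  (pvPatterns.filter (fun p => p.2.any (fun s => PySem.Str.isIn s low))).map Prod.fst

def interpret_path_semantics_py_alt (path : List String) (relationships : List String) : Option String :=
  if relationships.isEmpty then none
  else if PySem.List.len relationships = 1 then
    some ("Direct " ++ PySem.List.pyGetD relationships 0 "" ++ " relationship")
  else
    let tags := relationships.flatMap pvTags
    if (PySem.List.count tags "inh" : Int) = PySem.List.len relationships then
      some ("Inheritance hierarchy (" ++ PySem.Int.toStr (PySem.List.len relationships) ++ " levels)")
    else if tags.contains "pw" then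
      some "Part-whole relationship chain"
    else if tags.contains "assoc" then
      some "Association relationship chain"
    else
      some ("Complex relationship: " ++ PySem.Str.join " -> " relationships)

-- ===== PRECONDITION & SPEC =====
def Spec_interpret_path_semantics_py (path : List String) (relationships : List String) (out : Option String) : Prop := out = interpret_path_semantics_py_alt path relationships
instance (path : List String) (relationships : List String) (out : Option String) : Decidable (Spec_interpret_path_semantics_py path relationships out) := by unfold Spec_interpret_path_semantics_py; infer_instance

-- ===== CLAIM (what is proved, stated in full; the proofs are below) =====
def Claim_equal_interpret_path_semantics_py : Prop := ∀ (path : List String) (relationships : List String), Dom_interpret_path_semantics_py path relationships → Spec_interpret_path_semantics_py path relationships (interpret_path_semantics_py path relationships)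

-- ===== LEMMAS AND PROOFS =====
-- the tag list of one relationship, in terms of A's three predicates
theorem pvTags_eq (rel : String) :
    pvTags rel = (if pvInhA rel then ["inh"] else []) ++ (if pvPWA rel then ["pw"] else [])
      ++ (if pvAssocA rel then ["assoc"] else []) := by
  simp only [pvTags, pvPatterns, pvInhA, pvPWA, pvAssocA, List.filter_cons, List.filter_nil,
    List.any_cons, List.any_nil, Bool.or_false]
  split_ifs <;> rfl

-- counting "inh" in the flattened tag list counts the relationships A's all-scan accepts
theorem count_inh_eq (l : List String) :
    List.count "inh" (l.flatMap pvTags) = List.countP pvInhA l := by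
  induction l with
  | nil => simp
  | cons x t ih =>
    simp only [List.flatMap_cons, List.count_append, List.countP_cons, ih, pvTags_eq]
    split_ifs <;> simp <;> omega

-- "pw" membership in the tag list is A's any-part-whole scan
theorem mem_pw_iff (l : List String) :
    (l.flatMap pvTags).contains "pw" = l.any pvPWA := by
  induction l with
  | nil => simp
  | cons x t ih =>
    simp only [List.flatMap_cons, List.any_cons, ← ih, pvTags_eq]
    split_ifs <;> simp_all

-- "assoc" membership in the tag list is A's any-association scan
theorem mem_assoc_iff (l : List String) :
    (l.flatMap pvTags).contains "assoc" = l.any pvAssocA := by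
  induction l with
  | nil => simp
  | cons x t ih =>
    simp only [List.flatMap_cons, List.any_cons, ← ih, pvTags_eq]
    split_ifs <;> simp_all

-- the count test equals A's all-scan
theorem count_eq_len_iff (l : List String) :
    ((PySem.List.count (l.flatMap pvTags) "inh" : Int) = PySem.List.len l) ↔ l.all pvInhA = true := by
  rw [PySem.List.count_eq, count_inh_eq, PySem.List.len]
  constructor
  · intro h
    exact List.all_eq_true.2 fun a ha =>
      (List.countP_eq_length).1 (by exact_mod_cast h) a ha
  · intro h
    have := (List.countP_eq_length (p := pvInhA)).2 (List.all_eq_true.1 h)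
    exact_mod_cast this

-- ===== VERDICT (by name: the statement is the Claim_ definition above) =====
theorem interpret_path_semantics_py_spec : Claim_equal_interpret_path_semantics_py := by
  intro path relationships _
  unfold Spec_interpret_path_semantics_py
  simp only [interpret_path_semantics_py, interpret_path_semantics_py_alt]
  rw [mem_pw_iff, mem_assoc_iff]
  simp only [count_eq_len_iff]
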